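-- pv_equiv track=rewrite | github.com/Tobias-deWerk/PairWiseAlignmentViz | align_viz.py | collect_indices_for_range
-- ===== SOURCE A (Python) =====
-- from typing import Dict, List, Optional, Sequence, Tuple, Union
--
-- def collect_indices_for_range(
--     mapping: Dict[int, List[int]], start: int, end: int
-- ) -> List[int]:
--     if start > end:
--         return []
--     collected: List[int] = []
--     for value in range(start, end + 1):
--         collected.extend(mapping.get(value, []))
--     return sorted(set(collected))
-- ===== SOURCE B (Python) =====
-- def collect_indices_for_range(mapping, start, end):
--     acc = set()
--     for key, indices in reversed(list(mapping.items())):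
--         if start <= key <= end:
--             acc |= set(indices)
--     return sorted(acc)
-- ===== Notes on version B (the rewrite author's own statement) =====
-- stated objective: alternative
-- what changed: B walks the mapping's items back-to-front, accumulating a set by unioning the index lists of keys inside [start, end], instead of probing the dict for every integer in range(start, end+1) and deduplicating a concatenated list at the end.
import Mathlib
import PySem

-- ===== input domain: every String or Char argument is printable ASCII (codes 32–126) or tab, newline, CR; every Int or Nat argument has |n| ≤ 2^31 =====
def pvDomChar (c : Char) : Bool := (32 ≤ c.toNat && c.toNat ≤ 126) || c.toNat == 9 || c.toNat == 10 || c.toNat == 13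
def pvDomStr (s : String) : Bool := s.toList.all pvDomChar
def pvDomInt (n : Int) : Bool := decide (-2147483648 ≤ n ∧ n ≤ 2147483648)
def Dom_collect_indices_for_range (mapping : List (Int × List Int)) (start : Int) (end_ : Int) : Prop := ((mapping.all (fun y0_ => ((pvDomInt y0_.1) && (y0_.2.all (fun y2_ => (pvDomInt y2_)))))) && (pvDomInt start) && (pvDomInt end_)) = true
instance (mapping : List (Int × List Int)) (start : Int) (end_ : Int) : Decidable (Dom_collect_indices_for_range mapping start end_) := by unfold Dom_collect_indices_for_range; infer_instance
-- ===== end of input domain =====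

-- B walks the mapping's items back-to-front, unioning the index lists of in-range keys into a growing set, instead of probing the dict for every integer in the range (alternative traversal, same result).
-- ===== PORT A =====
def collect_indices_for_range (mapping : List (Int × List Int)) (start : Int) (end_ : Int) : List Int :=
  if start > end_ then []
  else
    let collected :=
      (PySem.List.pyRange start (end_ + 1) 1).foldl
        (fun acc value => acc ++ (PySem.Dict.mk mapping).getD value []) []
    PySem.List.sorted (PySem.Set.ofList collected) (fun x => x) false

-- ===== PORT B =====
def collect_indices_for_range_alt (mapping : List (Int × List Int)) (start : Int) (end_ : Int) : List Int :=
  let acc :=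
    mapping.reverse.foldl
      (fun acc kv =>
        if start ≤ kv.1 ∧ kv.1 ≤ end_ then PySem.Set.union acc kv.2 else acc)
      PySem.Set.empty
  PySem.List.sorted acc (fun x => x) false

-- ===== PRECONDITION & SPEC =====
-- Pre_ states the dict invariant: the association list has pairwise-distinct keys
-- (every list arising from a Python dict satisfies it); with a duplicate key A's
-- first-match get and B's full traversal could disagree.
def Pre_collect_indices_for_range (mapping : List (Int × List Int)) (_start : Int) (_end_ : Int) : Prop :=
  (mapping.map Prod.fst).Nodup

instance (mapping : List (Int × List Int)) (start : Int) (end_ : Int) : Decidable (Pre_collect_indices_for_range mapping start end_) := by unfold Pre_collect_indices_for_range; infer_instance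

def pvWitness_collect_indices_for_range : (List (Int × List Int)) × Int × Int := ([(1, [3, 2]), (2, [2, 5])], 0, 2)

def Spec_collect_indices_for_range (mapping : List (Int × List Int)) (start : Int) (end_ : Int) (out : List Int) : Prop := out = collect_indices_for_range_alt mapping start end_
instance (mapping : List (Int × List Int)) (start : Int) (end_ : Int) (out : List Int) : Decidable (Spec_collect_indices_for_range mapping start end_ out) := by unfold Spec_collect_indices_for_range; infer_instance

-- ===== CLAIM (what is proved, stated in full; the proofs are below) =====
def Claim_equal_collect_indices_for_range : Prop := ∀ (mapping : List (Int × List Int)) (start : Int) (end_ : Int), Dom_collect_indices_for_range mapping start end_ → Pre_collect_indices_for_range mapping start end_ → Spec_collect_indices_for_range mapping start end_ (collect_indices_for_range mapping start end_)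

-- ===== LEMMAS AND PROOFS =====

-- abbreviation for B's loop body over a list l starting from acc
def goStep (start end_ : Int) (acc : PySem.Set Int) (kv : Int × List Int) : PySem.Set Int :=
  if start ≤ kv.1 ∧ kv.1 ≤ end_ then PySem.Set.union acc kv.2 else acc

-- B's accumulator stays duplicate-free
theorem nodup_goFold (start end_ : Int) (l : List (Int × List Int))
    (acc : PySem.Set Int) (hacc : acc.Nodup) :
    (l.foldl (goStep start end_) acc).Nodup := by
  induction l generalizing acc with
  | nil => exact hacc
  | cons kv rest ih =>
    apply ih
    by_cases h : start ≤ kv.1 ∧ kv.1 ≤ end_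
    · simpa [goStep, h] using PySem.Set.nodup_union _ _ hacc
    · simpa [goStep, h] using hacc

-- membership in B's accumulator: already there, or contributed by an in-range item
theorem mem_goFold (start end_ : Int) (l : List (Int × List Int))
    (acc : PySem.Set Int) (x : Int) :
    x ∈ l.foldl (goStep start end_) acc
      ↔ x ∈ acc ∨ ∃ kv ∈ l, (start ≤ kv.1 ∧ kv.1 ≤ end_) ∧ x ∈ kv.2 := by
  induction l generalizing acc with
  | nil => simp
  | cons kv rest ih =>
    rw [List.foldl_cons, ih]
    by_cases h : start ≤ kv.1 ∧ kv.1 ≤ end_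
    · simp only [goStep, if_pos h, PySem.Set.mem_union _ _ _, List.mem_cons]
      constructor
      · rintro ((hx | hx) | ⟨kv', h1, h2⟩)
        · exact Or.inl hx
        · exact Or.inr ⟨kv, Or.inl rfl, h, hx⟩
        · exact Or.inr ⟨kv', Or.inr h1, h2⟩
      · rintro (hx | ⟨kv', (rfl | h1), h2⟩)
        · exact Or.inl (Or.inl hx)
        · exact Or.inl (Or.inr h2.2)
        · exact Or.inr ⟨kv', h1, h2⟩
    · simp only [goStep, if_neg h, List.mem_cons]
      constructor
      · rintro (hx | ⟨kv', h1, h2⟩)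
        · exact Or.inl hx
        · exact Or.inr ⟨kv', Or.inr h1, h2⟩
      · rintro (hx | ⟨kv', (rfl | h1), h2⟩)
        · exact Or.inl hx
        · exact absurd h2.1 h
        · exact Or.inr ⟨kv', h1, h2⟩

-- with distinct keys, a first-match lookup of a present key returns its value
theorem getD_mk_of_mem {mapping : List (Int × List Int)} {k : Int} {v : List Int}
    (hnd : (mapping.map Prod.fst).Nodup) (hmem : (k, v) ∈ mapping) :
    (PySem.Dict.mk mapping).getD k [] = v := by
  induction mapping with
  | nil => cases hmem
  | cons kv rest ih =>
    simp only [List.map_cons, List.nodup_cons] at hnd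
    rcases List.mem_cons.mp hmem with h | h
    · subst h
      simp [PySem.Dict.getD, PySem.Dict.get?_mk_cons]
    · have hne : kv.1 ≠ k := by
        intro he
        exact hnd.1 (he ▸ List.mem_map.mpr ⟨(k, v), h, rfl⟩)
      rw [PySem.Dict.getD, PySem.Dict.get?_mk_cons]
      simp only [beq_iff_eq, if_neg hne]
      exact ih hnd.2 h

-- a looked-up element comes from some pair of the list
theorem mem_getD_mk {mapping : List (Int × List Int)} {k : Int} {x : Int}
    (hx : x ∈ (PySem.Dict.mk mapping).getD k []) :
    ∃ v, (k, v) ∈ mapping ∧ x ∈ v := by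
  induction mapping with
  | nil => simp [PySem.Dict.getD, PySem.Dict.get?] at hx
  | cons kv rest ih =>
    rw [PySem.Dict.getD, PySem.Dict.get?_mk_cons] at hx
    by_cases he : kv.1 = k
    · simp only [he, beq_self_eq_true, if_pos, Option.getD_some] at hx
      exact ⟨kv.2, by rw [← he]; simp, hx⟩
    · simp only [beq_iff_eq, if_neg he] at hx
      rcases ih (by rw [PySem.Dict.getD]; exact hx) with ⟨v, hv, hxv⟩
      exact ⟨v, List.mem_cons_of_mem _ hv, hxv⟩

-- A's collected list and B's set have the same members (distinct keys)
theorem mem_collected_iff (mapping : List (Int × List Int)) (start end_ : Int)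
    (hnd : (mapping.map Prod.fst).Nodup) (x : Int) :
    (x ∈ (PySem.List.pyRange start (end_ + 1) 1).flatMap
        (fun value => (PySem.Dict.mk mapping).getD value []))
      ↔ x ∈ mapping.reverse.foldl (goStep start end_) PySem.Set.empty := by
  rw [mem_goFold]
  simp only [List.mem_flatMap, PySem.List.mem_pyRange_one, List.mem_reverse,
    PySem.Set.empty, List.not_mem_nil, false_or]
  constructor
  · rintro ⟨k, ⟨hk1, hk2⟩, hx⟩
    rcases mem_getD_mk hx with ⟨v, hv, hxv⟩
    exact ⟨(k, v), hv, ⟨hk1, by omega⟩, hxv⟩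
  · rintro ⟨⟨k, v⟩, hv, ⟨hk1, hk2⟩, hx⟩
    exact ⟨k, ⟨hk1, by omega⟩, by rw [getD_mk_of_mem hnd hv]; exact hx⟩

-- ===== VERDICT (by name: the statement is the Claim_ definition above) =====
theorem collect_indices_for_range_spec : Claim_equal_collect_indices_for_range := by
  intro mapping start end_ _ hpre
  unfold Spec_collect_indices_for_range collect_indices_for_range collect_indices_for_range_alt
  by_cases h : start > end_
  · rw [if_pos h]
    have hnil : mapping.reverse.foldl (goStep start end_) PySem.Set.empty = [] := by
      apply List.eq_nil_iff_forall_not_mem.mpr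
      intro x hx
      rcases (mem_goFold start end_ mapping.reverse PySem.Set.empty x).mp hx with
        hx' | ⟨kv, _, ⟨h1, h2⟩, _⟩
      · exact List.not_mem_nil hx'
      · omega
    show ([] : List Int)
      = PySem.List.sorted (mapping.reverse.foldl (goStep start end_) PySem.Set.empty)
          (fun x => x) false
    rw [hnil]
    rfl
  · rw [if_neg h]
    have hA :
        (PySem.List.pyRange start (end_ + 1) 1).foldl
            (fun acc value => acc ++ (PySem.Dict.mk mapping).getD value []) []
          = (PySem.List.pyRange start (end_ + 1) 1).flatMap
              (fun value => (PySem.Dict.mk mapping).getD value []) := by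
      simpa using PySem.List.foldl_append_eq_flatMap
        (fun value => (PySem.Dict.mk mapping).getD value [])
        (PySem.List.pyRange start (end_ + 1) 1) []
    rw [hA]
    apply PySem.List.sorted_eq_sorted_of_perm _ _ _ (fun a b hab => hab)
    exact (List.perm_ext_iff_of_nodup (PySem.Set.nodup_ofList _)
        (nodup_goFold _ _ _ _ List.nodup_nil)).mpr
      (fun x => by
        rw [PySem.Set.mem_ofList]
        exact mem_collected_iff mapping start end_ hpre x)
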